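-- pv_equiv track=rewrite | github.com/hao-n/crtk | crtk/utilities.py | opcode_occurrence
-- ===== SOURCE A (Python) =====
-- def collapse_opcode(opcode_list, collapse):
--     '''
--     Collapse opcodes by certain level.
--
--     input: list of strings, int
--     output: list of strings
--
--     collapse
--     - 0: Count all opcodes including all the PUSH-like, DUP-like and SWAP-like ones.
--     - 1: Collapse all PUSH-like opcodes to PUSH, DUP-like opcodes to DUP, SWAP-like opcodes to SWAP and LOG-like opcode to LOG.
--     - 2: Drop PUSH-like, DUP-like and SWAP-like opcodes, then replace all LOG-like opcodes with LOG.
--     - 3: Drop all PUSH-like, DUP-like, SWAP-like and LOG-like opcodes.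
--     '''
--     collapsed_opcode_list = []
--
--     if collapse == 0:
--         collapsed_opcode_list = opcode_list
--     elif collapse == 1:
--         for opcode in opcode_list:
--             if 'PUSH' in opcode:
--                 collapsed_opcode_list.append('PUSH')
--             elif 'DUP' in opcode:
--                 collapsed_opcode_list.append('DUP')
--             elif 'SWAP' in opcode:
--                 collapsed_opcode_list.append('SWAP')
--             elif 'LOG' in opcode:
--                 collapsed_opcode_list.append('LOG')
--             else:
--                 collapsed_opcode_list.append(opcode)
--     elif collapse == 2:
--         for opcode in opcode_list:
--             if not (('PUSH' in opcode) or ('DUP' in opcode) or ('SWAP' in opcode)):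
--                 if 'LOG' in opcode:
--                     collapsed_opcode_list.append('LOG')
--                 else:
--                     collapsed_opcode_list.append(opcode)
--             else:
--                 pass
--     elif collapse == 3:
--         for opcode in opcode_list:
--             if not (('PUSH' in opcode) or ('DUP' in opcode) or ('SWAP' in opcode) or ('LOG' in opcode)):
--                 collapsed_opcode_list.append(opcode)
--             else:
--                 pass
--     else:
--         raise ValueError('Parameter collapse can only be in [0, 1, 2, 3].')
--
--     return collapsed_opcode_list
--
-- def opcode_occurrence(opcode_list, collapse=0):
--     '''
--     Count ccurences of each opcode by a certain opcode sequence.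
--
--     input: list of strings, int
--     output: dict (string -> int)
--
--     collapse
--     - 0: Count all opcodes including all the PUSH-like, DUP-like and SWAP-like ones.
--     - 1: Collapse all PUSH-like opcodes to PUSH, DUP-like opcodes to DUP, SWAP-like opcodes to SWAP and LOG-like opcode to LOG.
--     - 2: Drop PUSH-like, DUP-like and SWAP-like opcodes, then replace all LOG-like opcodes with LOG.
--     - 3: Drop all PUSH-like, DUP-like, SWAP-like and LOG-like opcodes.
--     '''
--
--     stat_opcode_list = collapse_opcode(
--         opcode_list=opcode_list, collapse=collapse)
--
--     occurrence_stat = dict.fromkeys(stat_opcode_list, 0)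
--     opcode_list = collapse_opcode(opcode_list, collapse)
--     occurrence_stat['ERROR'] = 0
--
--     for opcode in opcode_list:
--         if 'ERROR' in opcode:
--             occurrence_stat['ERROR'] += 1
--         else:
--             occurrence_stat[opcode] += 1
--
--     return occurrence_stat
-- ===== SOURCE B (Python) =====
-- def opcode_occurrence(opcode_list, collapse=0):
--     # Single fused pass: collapse each opcode on the fly and count it immediately,
--     # accumulating ERROR-like opcodes in a separate counter assigned at the end.
--     if collapse not in (0, 1, 2, 3):
--         raise ValueError('Parameter collapse can only be in [0, 1, 2, 3].')
--     counts = {}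
--     errors = 0
--     for op in opcode_list:
--         if collapse == 1:
--             key = ('PUSH' if 'PUSH' in op else
--                    'DUP' if 'DUP' in op else
--                    'SWAP' if 'SWAP' in op else
--                    'LOG' if 'LOG' in op else op)
--         elif collapse == 2:
--             if 'PUSH' in op or 'DUP' in op or 'SWAP' in op:
--                 continue
--             key = 'LOG' if 'LOG' in op else op
--         elif collapse == 3:
--             if 'PUSH' in op or 'DUP' in op or 'SWAP' in op or 'LOG' in op:
--                 continue
--             key = op
--         else:
--             key = op
--         counts.setdefault(key, 0)
--         if 'ERROR' in key:
--             errors += 1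
--         else:
--             counts[key] += 1
--     counts['ERROR'] = errors
--     return counts
-- ===== Notes on version B (the rewrite author's own statement) =====
-- stated objective: alternative
-- what changed: A materialises the collapsed opcode list twice, pre-seeds a dict with dict.fromkeys over it and then runs a third counting pass; B makes one fused pass over the original list, collapsing each opcode on the fly, seeding keys lazily with setdefault and keeping the ERROR tally in a separate accumulator assigned once at the end.
import Mathlib
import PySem

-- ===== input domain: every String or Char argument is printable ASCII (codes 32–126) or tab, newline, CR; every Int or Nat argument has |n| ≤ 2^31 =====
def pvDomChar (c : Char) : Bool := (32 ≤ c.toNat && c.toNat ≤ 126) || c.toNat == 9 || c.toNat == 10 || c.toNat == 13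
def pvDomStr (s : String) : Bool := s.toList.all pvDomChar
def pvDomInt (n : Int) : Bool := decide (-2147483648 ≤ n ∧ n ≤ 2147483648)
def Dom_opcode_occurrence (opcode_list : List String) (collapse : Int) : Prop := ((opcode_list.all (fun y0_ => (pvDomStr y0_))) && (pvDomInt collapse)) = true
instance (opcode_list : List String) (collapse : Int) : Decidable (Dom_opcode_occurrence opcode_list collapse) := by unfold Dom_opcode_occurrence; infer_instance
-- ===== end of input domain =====

-- B fuses A's two collapse passes, the fromkeys seeding pass and the counting pass into a
-- single loop with a lazily-seeded dict and a separate ERROR accumulator; same return value.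

-- ===== PORT A =====
def collapse_opcode (opcode_list : List String) (collapse : Int) : List String :=
  if collapse = 0 then opcode_list
  else if collapse = 1 then
    opcode_list.foldl (fun acc op =>
      if PySem.Str.isIn "PUSH" op then acc ++ ["PUSH"]
      else if PySem.Str.isIn "DUP" op then acc ++ ["DUP"]
      else if PySem.Str.isIn "SWAP" op then acc ++ ["SWAP"]
      else if PySem.Str.isIn "LOG" op then acc ++ ["LOG"]
      else acc ++ [op]) []
  else if collapse = 2 then
    opcode_list.foldl (fun acc op =>
      if !(PySem.Str.isIn "PUSH" op || PySem.Str.isIn "DUP" op || PySem.Str.isIn "SWAP" op) then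
        (if PySem.Str.isIn "LOG" op then acc ++ ["LOG"] else acc ++ [op])
      else acc) []
  else if collapse = 3 then
    opcode_list.foldl (fun acc op =>
      if !(PySem.Str.isIn "PUSH" op || PySem.Str.isIn "DUP" op || PySem.Str.isIn "SWAP" op
            || PySem.Str.isIn "LOG" op) then acc ++ [op]
      else acc) []
  else []  -- Python raises ValueError here; excluded by Pre_

def opcode_occurrence (opcode_list : List String) (collapse : Int) : List (String × Int) :=
  let stat_opcode_list := collapse_opcode opcode_list collapse
  let occurrence_stat : PySem.Dict String Int :=
    stat_opcode_list.foldl (fun d k => d.insert k 0) PySem.Dict.empty  -- dict.fromkeys(…, 0)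
  let opcode_list2 := collapse_opcode opcode_list collapse
  let occurrence_stat := occurrence_stat.insert "ERROR" 0
  let occurrence_stat := opcode_list2.foldl (fun d op =>
      if PySem.Str.isIn "ERROR" op then d.modify "ERROR" 0 (· + 1)
      else d.modify op 0 (· + 1)) occurrence_stat
  occurrence_stat.items

-- ===== PORT B =====
-- the collapse-and-maybe-drop branch chain of Source B's loop body (none = continue)
def pvKeyB (collapse : Int) (op : String) : Option String :=
  if collapse = 1 then
    some (if PySem.Str.isIn "PUSH" op then "PUSH"
          else if PySem.Str.isIn "DUP" op then "DUP"
          else if PySem.Str.isIn "SWAP" op then "SWAP"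
          else if PySem.Str.isIn "LOG" op then "LOG"
          else op)
  else if collapse = 2 then
    if PySem.Str.isIn "PUSH" op || PySem.Str.isIn "DUP" op || PySem.Str.isIn "SWAP" op then none
    else some (if PySem.Str.isIn "LOG" op then "LOG" else op)
  else if collapse = 3 then
    if PySem.Str.isIn "PUSH" op || PySem.Str.isIn "DUP" op || PySem.Str.isIn "SWAP" op
        || PySem.Str.isIn "LOG" op then none
    else some op
  else some op

def opcode_occurrence_alt (opcode_list : List String) (collapse : Int) : List (String × Int) :=
  if collapse = 0 ∨ collapse = 1 ∨ collapse = 2 ∨ collapse = 3 then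
    let st := opcode_list.foldl (fun (st : PySem.Dict String Int × Int) op =>
      match pvKeyB collapse op with
      | none => st
      | some key =>
        let d := st.1.setdefault key 0
        if PySem.Str.isIn "ERROR" key then (d, st.2 + 1)
        else (d.modify key 0 (· + 1), st.2)) (PySem.Dict.empty, 0)
    (st.1.insert "ERROR" st.2).items
  else []  -- Source B raises ValueError here; excluded by Pre_

-- ===== PRECONDITION & SPEC =====
-- Pre_ excludes exactly the collapse values outside [0, 3], on which A raises ValueError.
def Pre_opcode_occurrence (opcode_list : List String) (collapse : Int) : Prop :=
  collapse = 0 ∨ collapse = 1 ∨ collapse = 2 ∨ collapse = 3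
instance (opcode_list : List String) (collapse : Int) : Decidable (Pre_opcode_occurrence opcode_list collapse) := by unfold Pre_opcode_occurrence; infer_instance

def pvWitness_opcode_occurrence : List String × Int :=
  (["ADD", "PUSH1", "LOG0", "ERROR", "ADD"], 1)

def Spec_opcode_occurrence (opcode_list : List String) (collapse : Int) (out : List (String × Int)) : Prop := out = opcode_occurrence_alt opcode_list collapse
instance (opcode_list : List String) (collapse : Int) (out : List (String × Int)) : Decidable (Spec_opcode_occurrence opcode_list collapse out) := by unfold Spec_opcode_occurrence; infer_instance

-- ===== CLAIM (what is proved, stated in full; the proofs are below) =====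
def Claim_equal_opcode_occurrence : Prop := ∀ (opcode_list : List String) (collapse : Int), Dom_opcode_occurrence opcode_list collapse → Pre_opcode_occurrence opcode_list collapse → Spec_opcode_occurrence opcode_list collapse (opcode_occurrence opcode_list collapse)

-- ===== LEMMAS AND PROOFS =====

-- abbreviation used only by the proofs: A's per-element counting slot and B's dict update
def pvG (op : String) : String := if PySem.Str.isIn "ERROR" op then "ERROR" else op
def pvDStep (d : PySem.Dict String Int) (k : String) : PySem.Dict String Int :=
  let d' := d.setdefault k 0
  if PySem.Str.isIn "ERROR" k then d' else d'.modify k 0 (· + 1)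

-- Source B's loop skips dropped opcodes: it is the same fold over the filterMap
theorem pv_B_fold (c : Int) (l : List String) :
    ∀ (st : PySem.Dict String Int × Int),
      l.foldl (fun (st : PySem.Dict String Int × Int) op =>
        match pvKeyB c op with
        | none => st
        | some key =>
          let d := st.1.setdefault key 0
          if PySem.Str.isIn "ERROR" key then (d, st.2 + 1)
          else (d.modify key 0 (· + 1), st.2)) st
      = (l.filterMap (pvKeyB c)).foldl (fun (st : PySem.Dict String Int × Int) key =>
          let d := st.1.setdefault key 0
          if PySem.Str.isIn "ERROR" key then (d, st.2 + 1)
          else (d.modify key 0 (· + 1), st.2)) st := by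
  induction l with
  | nil => intro st; rfl
  | cons x t ih =>
    intro st
    cases hfx : pvKeyB c x <;> simp only [List.foldl_cons, List.filterMap_cons, hfx, ih]

-- generic: an append-only loop whose per-element contribution is (f x).toList
theorem pv_foldl_acc {a b : Type} (f : a → Option b) (body : List b → a → List b)
    (h : ∀ acc x, body acc x = acc ++ (f x).toList) :
    ∀ (l : List a) (acc : List b), l.foldl body acc = acc ++ l.filterMap f := by
  intro l
  induction l with
  | nil => intro acc; simp
  | cons x t ih =>
    intro acc
    rw [List.foldl_cons, h, ih, List.filterMap_cons]
    cases hfx : f x <;> simp [hfx]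

-- collapse_opcode is the filterMap of Source B's per-element branch chain
theorem pv_collapse_eq (l : List String) (c : Int) (h : Pre_opcode_occurrence l c) :
    collapse_opcode l c = l.filterMap (pvKeyB c) := by
  rcases h with h | h | h | h <;> subst h <;> unfold collapse_opcode
  · rw [if_pos rfl,
      show pvKeyB 0 = fun op => some op from funext fun op => by unfold pvKeyB; norm_num,
      List.filterMap_some]
  · rw [if_neg (by norm_num), if_pos rfl,
      pv_foldl_acc (pvKeyB 1) _ (by
        intro acc x; simp only [pvKeyB]; norm_num; split_ifs <;> simp_all) l []]
    rfl
  · rw [if_neg (by norm_num), if_neg (by norm_num), if_pos rfl,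
      pv_foldl_acc (pvKeyB 2) _ (by
        intro acc x; simp only [pvKeyB]; norm_num; split_ifs <;> simp_all) l []]
    rfl
  · rw [if_neg (by norm_num), if_neg (by norm_num), if_neg (by norm_num), if_pos rfl,
      pv_foldl_acc (pvKeyB 3) _ (by
        intro acc x; simp only [pvKeyB]; norm_num; split_ifs <;> simp_all) l []]
    rfl

-- Source B's paired fold splits into the dict fold and the ERROR tally
theorem pv_pairfold (L : List String) :
    ∀ (d : PySem.Dict String Int) (e : Int),
      L.foldl (fun st key =>
          let d' := st.1.setdefault key 0
          if PySem.Str.isIn "ERROR" key then (d', st.2 + 1)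
          else (d'.modify key 0 (· + 1), st.2)) (d, e)
        = (L.foldl pvDStep d,
           e + (L.countP (fun op => PySem.Str.isIn "ERROR" op) : Int)) := by
  induction L with
  | nil => intro d e; simp
  | cons k t ih =>
    intro d e
    by_cases h : PySem.Str.isIn "ERROR" k <;>
      simp only [List.foldl_cons, List.countP_cons, pvDStep, h, if_true, if_false, ih,
        Bool.false_eq_true, Prod.mk.injEq] <;>
      exact ⟨by trivial, by push_cast; ring⟩

theorem pv_getD_setdefault_zero (d : PySem.Dict String Int) (k v : String) :
    (d.setdefault k 0).getD v 0 = d.getD v 0 := by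
  by_cases hc : d.contains k
  · rw [PySem.Dict.setdefault_of_contains _ _ hc]
  · have hc' : d.contains k = false := by simpa using hc
    rw [PySem.Dict.setdefault_of_not_contains _ _ hc', PySem.Dict.getD_insert]
    by_cases hv : v = k
    · subst hv
      rw [if_pos rfl, PySem.Dict.getD_of_not_contains _ 0 hc']
    · rw [if_neg hv]

theorem pv_getD_dfold (L : List String) :
    ∀ (d : PySem.Dict String Int) (v : String),
      (L.foldl pvDStep d).getD v 0
        = d.getD v 0 + (if PySem.Str.isIn "ERROR" v then 0 else (L.count v : Int)) := by
  induction L with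
  | nil => intro d v; simp
  | cons k t ih =>
    intro d v
    simp only [List.foldl_cons, List.count_cons, pvDStep]
    by_cases hk : PySem.Str.isIn "ERROR" k
    · rw [if_pos hk, ih, pv_getD_setdefault_zero]
      by_cases hv : PySem.Str.isIn "ERROR" v
      · rw [if_pos hv, if_pos hv]
      · have hvk : (k == v) = false :=
          beq_eq_false_iff_ne.mpr (fun h => hv (h ▸ hk))
        rw [if_neg hv, if_neg hv, hvk]
        simp
    · rw [if_neg hk, ih, PySem.Dict.getD_modify, pv_getD_setdefault_zero,
        pv_getD_setdefault_zero]
      by_cases hv : v = k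
      · subst hv
        rw [if_pos rfl, if_neg hk, if_neg hk, beq_self_eq_true]
        simp only [if_true]
        push_cast
        ring
      · rw [if_neg hv]
        have hvk : (k == v) = false := beq_eq_false_iff_ne.mpr (fun h => hv h.symm)
        rw [hvk]
        by_cases hs : PySem.Str.isIn "ERROR" v
        · rw [if_pos hs, if_pos hs]
        · rw [if_neg hs, if_neg hs]
          simp

-- keys of a dict after an insert, as a Set.add
theorem pv_keys_insert (d : PySem.Dict String Int) (k : String) (v : Int) :
    (d.insert k v).keys = PySem.Set.add d.keys k := by
  by_cases hc : d.contains k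
  · rw [PySem.Dict.keys_insert_of_contains _ _ hc,
      PySem.Set.add_of_mem ((PySem.Dict.contains_iff_mem_keys _ _).mp hc)]
  · have hc' : d.contains k = false := by simpa using hc
    rw [PySem.Dict.keys_insert_of_not_contains _ _ hc',
      PySem.Set.add_of_not_mem (fun h => hc ((PySem.Dict.contains_iff_mem_keys _ _).mpr h))]

theorem pv_keys_dstep (d : PySem.Dict String Int) (k : String) :
    (pvDStep d k).keys = PySem.Set.add d.keys k := by
  simp only [pvDStep]
  by_cases hc : d.contains k
  · have hm : k ∈ d.keys := (PySem.Dict.contains_iff_mem_keys _ _).mp hc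
    rw [PySem.Dict.setdefault_of_contains _ _ hc]
    by_cases hs : PySem.Str.isIn "ERROR" k
    · rw [if_pos hs, PySem.Set.add_of_mem hm]
    · rw [if_neg hs, PySem.Dict.keys_modify, pv_keys_insert, PySem.Set.add_of_mem hm]
  · have hc' : d.contains k = false := by simpa using hc
    rw [PySem.Dict.setdefault_of_not_contains _ _ hc']
    by_cases hs : PySem.Str.isIn "ERROR" k
    · rw [if_pos hs, pv_keys_insert]
    · rw [if_neg hs, PySem.Dict.keys_modify, pv_keys_insert, pv_keys_insert,
        PySem.Set.add_of_mem ((PySem.Set.mem_add _ _ _).mpr (Or.inr rfl))]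

theorem pv_keys_dfold (L : List String) :
    ∀ (d : PySem.Dict String Int),
      (L.foldl pvDStep d).keys = PySem.Set.update d.keys L := by
  induction L with
  | nil => intro d; simp [PySem.Set.update]
  | cons k t ih =>
    intro d
    rw [List.foldl_cons, ih, pv_keys_dstep, PySem.Set.update_cons]

-- dict.fromkeys(L, 0): every slot holds 0
theorem pv_getD_fromkeys (L : List String) :
    ∀ (d : PySem.Dict String Int) (v : String),
      (L.foldl (fun d k => d.insert k 0) d).getD v 0
        = if v ∈ L then 0 else d.getD v 0 := by
  induction L with
  | nil => intro d v; simp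
  | cons k t ih =>
    intro d v
    simp only [List.foldl_cons, ih, List.mem_cons, PySem.Dict.getD_insert]
    by_cases hv : v ∈ t
    · simp [hv]
    · by_cases he : v = k <;> simp [hv, he]

-- occurrences in the pvG-image of the collapsed list
theorem pv_count_map_g (L : List String) (v : String) :
    (L.map pvG).count v
      = if PySem.Str.isIn "ERROR" v
        then (if v = "ERROR" then L.countP (fun op => PySem.Str.isIn "ERROR" op) else 0)
        else L.count v := by
  induction L with
  | nil => simp
  | cons k t ih =>
    simp only [List.map_cons, List.count_cons, List.countP_cons, ih]
    by_cases hk : PySem.Str.isIn "ERROR" k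
    · have hg : pvG k = "ERROR" := by unfold pvG; rw [if_pos hk]
      rw [hg, if_pos hk]
      by_cases hv : PySem.Str.isIn "ERROR" v
      · rw [if_pos hv, if_pos hv]
        by_cases he : v = "ERROR"
        · subst he
          rw [if_pos rfl, if_pos rfl, beq_self_eq_true]
          simp
        · have hvk : ("ERROR" == v) = false := beq_eq_false_iff_ne.mpr (fun h => he h.symm)
          rw [if_neg he, if_neg he, hvk]
          simp
      · have h1 : ("ERROR" == v) = false :=
          beq_eq_false_iff_ne.mpr (fun h => hv (h ▸ (by decide : PySem.Str.isIn "ERROR" "ERROR" = true)))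
        have h2 : (k == v) = false := beq_eq_false_iff_ne.mpr (fun h => hv (h ▸ hk))
        rw [if_neg hv, if_neg hv, h1, h2]
    · have hg : pvG k = k := by unfold pvG; rw [if_neg hk]
      rw [hg, if_neg hk]
      by_cases hv : PySem.Str.isIn "ERROR" v
      · have h1 : (k == v) = false :=
          beq_eq_false_iff_ne.mpr (fun h => hk (h.symm ▸ hv))
        rw [if_pos hv, if_pos hv, h1]
        by_cases he : v = "ERROR" <;> simp [he]
      · rw [if_neg hv, if_neg hv]

theorem pv_update_of_subset (xs : List String) (s : PySem.Set String)
    (h : ∀ x ∈ xs, x ∈ s) : PySem.Set.update s xs = s := by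
  rw [PySem.Set.update_eq_append_filter]
  have hnil : (PySem.Set.ofList xs).filter (fun y => !(PySem.Set.contains s y)) = [] := by
    rw [List.filter_eq_nil_iff]
    intro y hy
    have hc := (PySem.Set.contains_iff s y).mpr (h y ((PySem.Set.mem_ofList _ _).mp hy))
    simpa using hc
  rw [hnil, List.append_nil]

-- A's counting loop is a plain counting loop over the pvG-image
theorem pv_foldl_modify_map (L : List String) (init : PySem.Dict String Int) :
    L.foldl (fun d op => d.modify (pvG op) 0 (· + 1)) init
      = (L.map pvG).foldl (fun d op => d.modify op 0 (· + 1)) init :=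
  (List.foldl_map (f := pvG)
    (g := fun (d : PySem.Dict String Int) op => d.modify op 0 (· + 1))).symm

-- ===== VERDICT (by name: the statement is the Claim_ definition above) =====
theorem opcode_occurrence_spec : Claim_equal_opcode_occurrence := by
  intro l c _ hpre
  unfold Spec_opcode_occurrence
  show ((collapse_opcode l c).foldl (fun d op =>
      if PySem.Str.isIn "ERROR" op then d.modify "ERROR" 0 (· + 1)
      else d.modify op 0 (· + 1))
      ((((collapse_opcode l c).foldl (fun d k => d.insert k 0) PySem.Dict.empty)).insert "ERROR" 0)).items
    = opcode_occurrence_alt l c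
  have hB : opcode_occurrence_alt l c
      = (((l.filterMap (pvKeyB c)).foldl pvDStep PySem.Dict.empty).insert "ERROR"
          (0 + ((l.filterMap (pvKeyB c)).countP (fun op => PySem.Str.isIn "ERROR" op) : Int))).items := by
    have hstep := (pv_B_fold c l (PySem.Dict.empty, 0)).trans
      (pv_pairfold (l.filterMap (pvKeyB c)) PySem.Dict.empty 0)
    unfold opcode_occurrence_alt
    rw [if_pos (show c = 0 ∨ c = 1 ∨ c = 2 ∨ c = 3 from hpre)]
    exact congrArg (fun (p : PySem.Dict String Int × Int) =>
      (p.1.insert "ERROR" p.2).items) hstep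
  rw [hB, pv_collapse_eq l c hpre]
  set L := l.filterMap (pvKeyB c) with hL
  -- A's counting loop increments slot (pvG op)
  rw [PySem.List.foldl_congr_mem L
      (fun (d : PySem.Dict String Int) op =>
        if PySem.Str.isIn "ERROR" op then d.modify "ERROR" 0 (· + 1)
        else d.modify op 0 (· + 1))
      (fun (d : PySem.Dict String Int) op => d.modify (pvG op) 0 (· + 1)) _ (by
    intro acc x _
    show (if PySem.Str.isIn "ERROR" x then acc.modify "ERROR" 0 (· + 1)
        else acc.modify x 0 (· + 1)) = acc.modify (pvG x) 0 (· + 1)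
    by_cases hs : PySem.Str.isIn "ERROR" x
    · rw [if_pos hs]
      unfold pvG
      rw [if_pos hs]
    · rw [if_neg hs]
      unfold pvG
      rw [if_neg hs]),
    pv_foldl_modify_map]
  -- both dicts carry the same key list
  have hk0 : ((L.foldl (fun (d : PySem.Dict String Int) k => d.insert k 0) PySem.Dict.empty)).keys
      = PySem.Set.ofList L := by
    rw [PySem.Dict.keys_foldl_insert L (fun _ _ => 0)]
    exact PySem.Set.update_empty L
  have hkA : ((L.map pvG).foldl (fun (d : PySem.Dict String Int) op => d.modify op 0 (· + 1))
      (((L.foldl (fun (d : PySem.Dict String Int) k => d.insert k 0) PySem.Dict.empty)).insert "ERROR" 0)).keys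
      = PySem.Set.add (PySem.Set.ofList L) "ERROR" := by
    rw [PySem.Dict.keys_foldl_modify (L.map pvG) 0 (fun _ _ => (· + 1)), pv_keys_insert]
    simp only [hk0]
    apply pv_update_of_subset
    intro x hx
    rcases List.mem_map.mp hx with ⟨op, hop, rfl⟩
    by_cases hs : PySem.Str.isIn "ERROR" op
    · have : pvG op = "ERROR" := by unfold pvG; rw [if_pos hs]
      rw [this]
      exact (PySem.Set.mem_add _ _ _).mpr (Or.inr rfl)
    · have : pvG op = op := by unfold pvG; rw [if_neg hs]
      rw [this]
      exact (PySem.Set.mem_add _ _ _).mpr (Or.inl ((PySem.Set.mem_ofList _ _).mpr hop))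
  have hkB : ((L.foldl pvDStep PySem.Dict.empty).insert "ERROR"
        (0 + (L.countP (fun op => PySem.Str.isIn "ERROR" op) : Int))).keys
      = PySem.Set.add (PySem.Set.ofList L) "ERROR" := by
    rw [pv_keys_insert, pv_keys_dfold,
      show (PySem.Dict.empty : PySem.Dict String Int).keys = ([] : List String) from rfl,
      show PySem.Set.update ([] : List String) L = PySem.Set.ofList L from PySem.Set.update_empty L]
  have hnd : (PySem.Set.add (PySem.Set.ofList L) "ERROR").Nodup :=
    PySem.Set.nodup_add _ _ (PySem.Set.nodup_ofList L)
  rw [PySem.Dict.items_eq_map_keys _ (by rw [hkA]; exact hnd) 0,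
    PySem.Dict.items_eq_map_keys _ (by rw [hkB]; exact hnd) 0, hkA, hkB]
  apply List.map_congr_left
  intro k _
  have hvA : ((L.map pvG).foldl (fun (d : PySem.Dict String Int) op => d.modify op 0 (· + 1))
      (((L.foldl (fun (d : PySem.Dict String Int) k => d.insert k 0) PySem.Dict.empty)).insert "ERROR" 0)).getD k 0
      = ((L.map pvG).count k : Int) := by
    rw [PySem.Dict.getD_foldl_modify_add_one, PySem.Dict.getD_insert]
    split_ifs with he
    · simp
    · rw [pv_getD_fromkeys]
      split_ifs <;> simp
  have hvB : ((L.foldl pvDStep PySem.Dict.empty).insert "ERROR"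
        (0 + (L.countP (fun op => PySem.Str.isIn "ERROR" op) : Int))).getD k 0
      = if k = "ERROR" then (L.countP (fun op => PySem.Str.isIn "ERROR" op) : Int)
        else (if PySem.Str.isIn "ERROR" k then 0 else (L.count k : Int)) := by
    rw [PySem.Dict.getD_insert]
    by_cases he : k = "ERROR"
    · rw [if_pos he, if_pos he, zero_add]
    · rw [if_neg he, if_neg he, pv_getD_dfold,
        show (PySem.Dict.empty : PySem.Dict String Int).getD k 0 = (0 : Int) from rfl, zero_add]
  rw [Prod.mk.injEq]
  refine ⟨rfl, ?_⟩
  rw [hvA, hvB, pv_count_map_g]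
  by_cases he : k = "ERROR"
  · subst he
    rw [if_pos (show PySem.Str.isIn "ERROR" "ERROR" = true from by decide), if_pos rfl, if_pos rfl]
  · by_cases hs : PySem.Str.isIn "ERROR" k <;> simp [hs, he]
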